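-- pv_equiv track=rewrite | github.com/130e/webrtc-conductor | random_file_selector.py | filter_by_categories
-- ===== SOURCE A (Python) =====
-- def filter_by_categories(files, categories):
--     """Filter files by specified categories."""
--     if not categories or "all" in categories:
--         return files
--
--     filtered_files = []
--     for file_path in files:
--         for category in categories:
--             if f"/{category}/" in file_path:
--                 filtered_files.append(file_path)
--                 break
--
--     return filtered_files
-- ===== SOURCE B (Python) =====
-- def filter_by_categories(files, categories):
--     """Filter files by specified categories."""
--     if not categories or "all" in categories:
--         return files
--
--     # category-major pass: mark the indices of matching files, then emit in order
--     matched = set()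
--     for category in categories:
--         needle = f"/{category}/"
--         for i, file_path in enumerate(files):
--             if needle in file_path:
--                 matched.add(i)
--     return [f for i, f in enumerate(files) if i in matched]
-- ===== Notes on version B (the rewrite author's own statement) =====
-- stated objective: alternative
-- what changed: Replaces A's file-major loop with an inner break over categories by a category-major sweep that records matching file indices in a set, then emits the files in one final ordered pass.
import Mathlib
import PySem

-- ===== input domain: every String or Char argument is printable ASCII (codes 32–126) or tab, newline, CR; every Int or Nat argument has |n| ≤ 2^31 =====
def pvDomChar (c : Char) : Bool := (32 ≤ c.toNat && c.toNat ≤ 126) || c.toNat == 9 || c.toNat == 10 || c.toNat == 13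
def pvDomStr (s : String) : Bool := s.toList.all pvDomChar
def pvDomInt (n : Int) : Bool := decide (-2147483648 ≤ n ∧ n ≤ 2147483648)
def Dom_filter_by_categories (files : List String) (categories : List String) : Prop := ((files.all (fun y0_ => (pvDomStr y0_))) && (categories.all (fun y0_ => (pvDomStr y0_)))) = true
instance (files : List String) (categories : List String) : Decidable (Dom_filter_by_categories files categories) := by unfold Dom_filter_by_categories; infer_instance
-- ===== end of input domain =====

-- B replaces A's file-major loop (inner break over categories) by a category-major sweep that
-- marks matched file indices in a set and then emits the files in one ordered pass (objective: alternative).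

-- f"/{category}/" as a character list (exact: string concatenation of ASCII strings)
def pvNeedle (c : String) : List Char := '/' :: c.toList ++ ['/']

-- ===== PORT A =====
-- the inner 'for category in categories: if needle in file_path: append; break' loop,
-- as a recursion returning whether the break fired
def pvAInner (file_path : String) : List String → Bool
  | [] => false
  | c :: cs =>
    if PySem.Chars.isIn (pvNeedle c) file_path.toList then true
    else pvAInner file_path cs

def filter_by_categories (files : List String) (categories : List String) : List String :=
  if categories.isEmpty || categories.contains "all" then files
  else
    files.foldl (fun filtered_files file_path =>
      if pvAInner file_path categories then filtered_files ++ [file_path] else filtered_files) []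

-- ===== PORT B =====
def filter_by_categories_alt (files : List String) (categories : List String) : List String :=
  if categories.isEmpty || categories.contains "all" then files
  else
    let matched : PySem.Set Int :=
      categories.foldl (fun s category =>
        (PySem.List.enumerate files 0).foldl (fun s p =>
          if PySem.Chars.isIn (pvNeedle category) p.2.toList then PySem.Set.add s p.1 else s) s)
        PySem.Set.empty
    ((PySem.List.enumerate files 0).filter (fun p => PySem.Set.contains matched p.1)).map (·.2)

-- ===== PRECONDITION & SPEC =====
def Spec_filter_by_categories (files : List String) (categories : List String) (out : List String) : Prop := out = filter_by_categories_alt files categories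
instance (files : List String) (categories : List String) (out : List String) : Decidable (Spec_filter_by_categories files categories out) := by unfold Spec_filter_by_categories; infer_instance

-- ===== CLAIM (what is proved, stated in full; the proofs are below) =====
def Claim_equal_filter_by_categories : Prop := ∀ (files : List String) (categories : List String), Dom_filter_by_categories files categories → Spec_filter_by_categories files categories (filter_by_categories files categories)

-- ===== LEMMAS AND PROOFS =====

-- the break-recursion is 'any'
theorem pvAInner_eq_any (f : String) (cs : List String) :
    pvAInner f cs = cs.any (fun c => PySem.Chars.isIn (pvNeedle c) f.toList) := by
  induction cs with
  | nil => rfl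
  | cons c cs ih => simp [pvAInner, List.any_cons, ih]

-- one category's index-marking pass over any pair list
theorem pv_mem_foldl_addIf {α : Type} (P : α → Bool) (l : List (Int × α)) (s : PySem.Set Int) (i : Int) :
    (i ∈ l.foldl (fun s p => if P p.2 then PySem.Set.add s p.1 else s) s) ↔
      i ∈ s ∨ ∃ p ∈ l, P p.2 ∧ p.1 = i := by
  induction l generalizing s with
  | nil => simp
  | cons p l ih =>
    simp only [List.foldl_cons, List.mem_cons, ih]
    split_ifs with h
    · rw [PySem.Set.mem_add]
      constructor
      · rintro (⟨hs | rfl⟩ | ⟨q, hq, hP, rfl⟩)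
        · exact .inl hs
        · exact .inr ⟨p, .inl rfl, h, rfl⟩
        · exact .inr ⟨q, .inr hq, hP, rfl⟩
      · rintro (hs | ⟨q, (rfl | hq), hP, rfl⟩)
        · exact .inl (.inl hs)
        · exact .inl (.inr rfl)
        · exact .inr ⟨q, hq, hP, rfl⟩
    · constructor
      · rintro (hs | ⟨q, hq, hP, rfl⟩)
        · exact .inl hs
        · exact .inr ⟨q, .inr hq, hP, rfl⟩
      · rintro (hs | ⟨q, (rfl | hq), hP, rfl⟩)
        · exact .inl hs
        · exact absurd hP (by simp [h])
        · exact .inr ⟨q, hq, hP, rfl⟩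

-- the whole category-major marking loop
theorem pv_mem_matched (files : List String) (cats : List String) (s : PySem.Set Int) (i : Int) :
    (i ∈ cats.foldl (fun s category =>
        (PySem.List.enumerate files 0).foldl (fun s p =>
          if PySem.Chars.isIn (pvNeedle category) p.2.toList then PySem.Set.add s p.1 else s) s) s) ↔
      i ∈ s ∨ ∃ c ∈ cats, ∃ p ∈ PySem.List.enumerate files 0,
        PySem.Chars.isIn (pvNeedle c) p.2.toList ∧ p.1 = i := by
  induction cats generalizing s with
  | nil => simp
  | cons c cs ih =>
    simp only [List.foldl_cons]
    rw [ih, pv_mem_foldl_addIf (fun f : String => PySem.Chars.isIn (pvNeedle c) f.toList)]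
    simp only [List.mem_cons]
    constructor
    · rintro ((hs | ⟨p, hp, hP, rfl⟩) | ⟨c', hc', hrest⟩)
      · exact .inl hs
      · exact .inr ⟨c, .inl rfl, p, hp, hP, rfl⟩
      · exact .inr ⟨c', .inr hc', hrest⟩
    · rintro (hs | ⟨c', (rfl | hc'), hrest⟩)
      · exact .inl (.inl hs)
      · exact .inl (.inr hrest)
      · exact .inr ⟨c', hc', hrest⟩

-- filter-then-project on pairs, when the test agrees with a test on the value
theorem pv_filter_map_snd {α : Type} (l : List (Int × α)) (q : Int × α → Bool) (r : α → Bool)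
    (h : ∀ p ∈ l, q p = r p.2) :
    (l.filter q).map (·.2) = (l.map (·.2)).filter r := by
  induction l with
  | nil => rfl
  | cons p l ih =>
    have hp := h p (.head _)
    have ih' := ih (fun p hp => h p (.tail _ hp))
    simp only [List.filter_cons, hp, List.map_cons]
    by_cases hr : r p.2 = true <;> simp [hr, ih']

-- ===== VERDICT (by name: the statement is the Claim_ definition above) =====
theorem filter_by_categories_spec : Claim_equal_filter_by_categories := by
  intro files categories _
  unfold Spec_filter_by_categories filter_by_categories filter_by_categories_alt
  split_ifs with hguard
  · rfl
  · rw [PySem.List.foldl_append_if_eq_filter, List.nil_append]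
    rw [pv_filter_map_snd _ _ (fun f => pvAInner f categories), PySem.List.map_snd_enumerate]
    intro p hp
    rw [pvAInner_eq_any, Bool.eq_iff_iff, PySem.Set.contains_iff, pv_mem_matched]
    simp only [PySem.Set.empty, List.not_mem_nil, false_or, List.any_eq_true]
    constructor
    · rintro ⟨c, hc, p', hp', hP, heq⟩
      -- same index in enumerate ⇒ same pair
      rw [PySem.List.mem_enumerate_iff] at hp hp'
      obtain ⟨k, hk, rfl⟩ := hp
      obtain ⟨k', hk', rfl⟩ := hp'
      simp only [zero_add] at heq
      have : k' = k := by exact_mod_cast heq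
      subst this
      exact ⟨c, hc, hP⟩
    · rintro ⟨c, hc, hP⟩
      exact ⟨c, hc, p, hp, hP, rfl⟩
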